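-- pv_equiv track=rewrite | github.com/pwmcclung/practProbs | sushi.py | total_bill
-- ===== SOURCE A (Python) =====
-- def total_bill(s):
--     lst_s = list(s)
--     cost = 0
--     count = 0
--     while len(lst_s) > 0:
--         item = lst_s.pop(0)
--         count += 1
--         if item == ' ':
--             count -= 1
--         else:
--             if count % 5 == 0:
--                 pass
--             else:
--                 cost += 2
--     return cost
-- ===== SOURCE B (Python) =====
-- def total_bill(s):
--     n = sum(1 for c in s if c != ' ')
--     return 2 * (n - n // 5)
-- ===== Notes on version B (the rewrite author's own statement) =====
-- stated objective: simpler
-- what changed: Replaces the destructive pop(0) loop with running cost/position counters by a single count of non-space characters and the closed form 2*(n - n//5).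
import Mathlib
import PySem

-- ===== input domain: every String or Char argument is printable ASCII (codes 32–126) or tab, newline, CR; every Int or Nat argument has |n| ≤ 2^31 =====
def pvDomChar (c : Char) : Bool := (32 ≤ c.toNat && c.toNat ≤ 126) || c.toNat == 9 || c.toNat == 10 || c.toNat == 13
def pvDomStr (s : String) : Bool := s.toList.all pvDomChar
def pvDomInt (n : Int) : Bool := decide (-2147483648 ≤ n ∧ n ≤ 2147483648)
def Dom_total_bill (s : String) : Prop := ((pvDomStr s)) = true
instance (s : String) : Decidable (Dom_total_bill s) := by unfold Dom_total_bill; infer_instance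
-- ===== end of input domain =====

-- B replaces A's destructive pop(0) loop with a count of non-space chars and the closed form 2*(n - n//5): simpler and O(n) instead of O(n^2).


-- ===== PORT A =====
-- A's while loop pops the head of the list each iteration: structural recursion on the list
-- with the same (cost, count) state, branches in the same order.
def totalBillLoop : List Char → Int → Int → Int
  | [], cost, _ => cost
  | item :: rest, cost, count =>
    let count := count + 1
    if item = ' ' then
      totalBillLoop rest cost (count - 1)
    else
      if count % 5 = 0 then
        totalBillLoop rest cost count
      else
        totalBillLoop rest (cost + 2) count

def total_bill (s : String) : Int :=
  totalBillLoop s.toList 0 0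

-- ===== PORT B =====
-- n = sum(1 for c in s if c != ' ') as a fold; then 2 * (n - n // 5).
def total_bill_alt (s : String) : Int :=
  let n : Int := s.toList.foldl (fun acc c => if c ≠ ' ' then acc + 1 else acc) 0
  2 * (n - PySem.Int.floordiv n 5)

-- ===== PRECONDITION & SPEC =====
def Spec_total_bill (s : String) (out : Int) : Prop := out = total_bill_alt s
instance (s : String) (out : Int) : Decidable (Spec_total_bill s out) := by unfold Spec_total_bill; infer_instance

-- ===== CLAIM (what is proved, stated in full; the proofs are below) =====
def Claim_equal_total_bill : Prop := ∀ (s : String), Dom_total_bill s → Spec_total_bill s (total_bill s)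

-- ===== LEMMAS AND PROOFS =====

-- number of non-space characters, as a Nat
def nspace (l : List Char) : Nat := (l.filter (fun c => c ≠ ' ')).length

lemma alt_count_eq (l : List Char) (k : Int) :
    l.foldl (fun acc c => if c ≠ ' ' then acc + 1 else acc) k = k + (nspace l : Int) := by
  induction l generalizing k with
  | nil => simp [nspace]
  | cons c rest ih =>
    by_cases h : c = ' ' <;> simp [nspace, List.filter, h, ih, List.foldl] at * <;>
      simp [ih, nspace] <;> push_cast <;> ring

-- loop invariant: starting at count = k with cost = 2*(k - k/5), the loop ends at
-- m = k + nspace l with cost 2*(m - m/5).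
lemma loop_closed (l : List Char) (k : Nat) :
    totalBillLoop l (2 * ((k : Int) - (k : Int) / 5)) k
      = 2 * (((k + nspace l : Nat) : Int) - ((k + nspace l : Nat) : Int) / 5) := by
  induction l generalizing k with
  | nil => simp [totalBillLoop, nspace]
  | cons c rest ih =>
    by_cases h : c = ' '
    · simp [totalBillLoop, h, nspace, List.filter]
      have := ih k
      simpa [nspace] using this
    · simp only [totalBillLoop, h, if_false]
      have hk1 : ((k : Int) + 1) = ((k + 1 : Nat) : Int) := by push_cast; ring
      by_cases h5 : ((k : Int) + 1) % 5 = 0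
      · simp only [h5, if_pos rfl]
        have hcost : (2 * ((k : Int) - (k : Int) / 5)) = 2 * (((k+1 : Nat) : Int) - ((k+1 : Nat) : Int) / 5) := by
          push_cast; omega
        have hns : nspace (c :: rest) = nspace rest + 1 := by
          simp [nspace, List.filter, h]
        rw [hcost, hk1, hns, show k + (nspace rest + 1) = k + 1 + nspace rest from by omega]
        simpa using ih (k + 1)
      · simp only [h5, if_neg h5]
        have hcost : (2 * ((k : Int) - (k : Int) / 5) + 2) = 2 * (((k+1 : Nat) : Int) - ((k+1 : Nat) : Int) / 5) := by
          push_cast at h5 ⊢; omega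
        have hns : nspace (c :: rest) = nspace rest + 1 := by
          simp [nspace, List.filter, h]
        rw [hcost, hk1, hns, show k + (nspace rest + 1) = k + 1 + nspace rest from by omega]
        simpa using ih (k + 1)

-- ===== VERDICT (by name: the statement is the Claim_ definition above) =====
theorem total_bill_spec : Claim_equal_total_bill := by
  intro s _
  unfold Spec_total_bill total_bill total_bill_alt
  have h0 := loop_closed s.toList 0
  norm_num at h0
  rw [h0, alt_count_eq]
  have hnn : (0:Int) ≤ (nspace s.toList : Int) := Int.natCast_nonneg _
  simp only [zero_add, PySem.Int.floordiv]
  rw [Int.fdiv_eq_ediv_of_nonneg _ (by norm_num)]
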